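-- pv_equiv track=rewrite | github.com/Lundaa/hw_update_chinaip | my_function.py | get_delete_id
-- ===== SOURCE A (Python) =====
-- def get_delete_id(delete_list_temp, fw_china_ip_dict):
--     """
--         根据delete_list_temp获取防火墙对应ip组内ip所属id
--     :param delete_list_temp: 删除列表temp
--     :param fw_china_ip_dict: 防火墙中的chinaip字典
--     :return: 最终删除列表，元组类型
--     """
--     final_delete_group1 = ['ip address-set china_ip_group_1']
--     final_delete_group2 = ['ip address-set china_ip_group_2']
--     for x in delete_list_temp:
--         for k, v in fw_china_ip_dict.items():
--             for item in v:
--                 if x in item: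
--                     count = 0
--                     for d in range(len(item)):
--                         if item[d] == ' ':
--                             count += 1
--                             if count == 2:
--                                 id_str = item[7:d + 1]
--                                 new_id = id_str.replace(' ', '')
--                                 if k in "ip address-set china_ip_group_1":
--                                     final_delete_group1.append('undo address %s' % new_id)
--                                 else:
--                                     final_delete_group2.append('undo address %s' % new_id)
--     return final_delete_group1, final_delete_group2
-- ===== SOURCE B (Python) =====
-- def get_delete_id(delete_list_temp, fw_china_ip_dict):
--     final_delete_group1 = ['ip address-set china_ip_group_1']
--     final_delete_group2 = ['ip address-set china_ip_group_2']
--     # Precompute once per dict item: its undo command (at the second space) and group flag.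
--     entries = []
--     for k, v in fw_china_ip_dict.items():
--         is1 = k in "ip address-set china_ip_group_1"
--         for item in v:
--             sp = [i for i, c in enumerate(item) if c == ' ']
--             if len(sp) >= 2:
--                 cmd = 'undo address %s' % item[7:sp[1] + 1].replace(' ', '')
--                 entries.append((item, cmd, is1))
--     for x in delete_list_temp:
--         for item, cmd, is1 in entries:
--             if x in item:
--                 (final_delete_group1 if is1 else final_delete_group2).append(cmd)
--     return final_delete_group1, final_delete_group2
-- ===== Notes on version B (the rewrite author's own statement) =====
-- stated objective: faster
-- what changed: B flattens the dict and precomputes each item's undo command and group flag once (reading the second-space index off the item's list of space positions) before the delete-list loop, so the triply nested per-match counting character scan of A disappears; the delete loop then only does one substring test per (entry, item) pair.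
import Mathlib
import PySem

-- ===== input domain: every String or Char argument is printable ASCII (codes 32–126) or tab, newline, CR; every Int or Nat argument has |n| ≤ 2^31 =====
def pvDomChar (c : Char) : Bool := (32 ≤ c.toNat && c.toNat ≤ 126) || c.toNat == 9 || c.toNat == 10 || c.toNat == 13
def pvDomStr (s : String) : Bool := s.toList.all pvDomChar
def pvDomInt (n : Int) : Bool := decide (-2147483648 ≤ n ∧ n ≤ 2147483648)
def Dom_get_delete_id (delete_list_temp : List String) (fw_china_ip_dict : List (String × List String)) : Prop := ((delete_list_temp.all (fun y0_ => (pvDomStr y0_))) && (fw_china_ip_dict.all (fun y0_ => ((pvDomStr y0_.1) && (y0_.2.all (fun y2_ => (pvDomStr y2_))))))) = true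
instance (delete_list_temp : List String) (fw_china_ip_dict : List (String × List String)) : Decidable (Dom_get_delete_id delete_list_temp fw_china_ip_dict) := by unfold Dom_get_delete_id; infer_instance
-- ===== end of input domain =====

-- B hoists the per-item undo-command computation out of the delete-list loop: command and group
-- flag are computed once per dict item (via its list of space positions) into a flat list, which
-- each delete entry is then matched against — alternative decomposition, same results.


-- ===== PORT A =====
-- A helper: the inner character loop of A ("for d in range(len(item)) ... count == 2").
def pvInnerA (k item : String) (g : List String × List String) : List String × List String :=
  ((PySem.List.pyRange 0 (PySem.Str.len item) 1).foldl
    (fun (st : Int × (List String × List String)) d =>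
      if PySem.Str.pyGet? item d = some ' ' then
        let count := st.1 + 1
        if count = 2 then
          let id_str := PySem.Str.slice item (some 7) (some (d + 1))
          let new_id := PySem.Str.replace id_str " " ""
          if PySem.Str.isIn k "ip address-set china_ip_group_1" then
            (count, (st.2.1 ++ ["undo address " ++ new_id], st.2.2))
          else
            (count, (st.2.1, st.2.2 ++ ["undo address " ++ new_id]))
        else (count, st.2)
      else st)
    (0, g)).2

def get_delete_id (delete_list_temp : List String) (fw_china_ip_dict : List (String × List String)) : List String × List String :=
  delete_list_temp.foldl
    (fun g x =>
      (PySem.Dict.ofList fw_china_ip_dict).items.foldl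
        (fun g kv =>
          kv.2.foldl
            (fun g item => if PySem.Str.isIn x item then pvInnerA kv.1 item g else g) g)
        g)
    (["ip address-set china_ip_group_1"], ["ip address-set china_ip_group_2"])

-- ===== PORT B =====
-- B helper: entries precomputed once per dict item: (item, undo command, group-1 flag).
def pvEntriesB (fw_china_ip_dict : List (String × List String)) : List (String × String × Bool) :=
  (PySem.Dict.ofList fw_china_ip_dict).items.foldl
    (fun es kv =>
      let is1 := PySem.Str.isIn kv.1 "ip address-set china_ip_group_1"
      kv.2.foldl
        (fun es item =>
          let sp := ((PySem.List.enumerate item.toList 0).filter (fun p => p.2 == ' ')).map (·.1)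
          match sp[1]? with
          | some i =>
            let cmd := "undo address " ++
              PySem.Str.replace (PySem.Str.slice item (some 7) (some (i + 1))) " " ""
            es ++ [(item, cmd, is1)]
          | none => es) es)
    []

def get_delete_id_alt (delete_list_temp : List String) (fw_china_ip_dict : List (String × List String)) : List String × List String :=
  let entries := pvEntriesB fw_china_ip_dict
  delete_list_temp.foldl
    (fun g x =>
      entries.foldl
        (fun g e =>
          if PySem.Str.isIn x e.1 then
            if e.2.2 then (g.1 ++ [e.2.1], g.2) else (g.1, g.2 ++ [e.2.1])
          else g) g)
    (["ip address-set china_ip_group_1"], ["ip address-set china_ip_group_2"])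


-- ===== PRECONDITION & SPEC =====
def Spec_get_delete_id (delete_list_temp : List String) (fw_china_ip_dict : List (String × List String)) (out : List String × List String) : Prop := out = get_delete_id_alt delete_list_temp fw_china_ip_dict
instance (delete_list_temp : List String) (fw_china_ip_dict : List (String × List String)) (out : List String × List String) : Decidable (Spec_get_delete_id delete_list_temp fw_china_ip_dict out) := by unfold Spec_get_delete_id; infer_instance

-- ===== CLAIM (what is proved, stated in full; the proofs are below) =====
def Claim_equal_get_delete_id : Prop := ∀ (delete_list_temp : List String) (fw_china_ip_dict : List (String × List String)), Dom_get_delete_id delete_list_temp fw_china_ip_dict → Spec_get_delete_id delete_list_temp fw_china_ip_dict (get_delete_id delete_list_temp fw_china_ip_dict)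

-- ===== LEMMAS AND PROOFS =====
def pvCmd (item : String) (d : Int) : String :=
  "undo address " ++ PySem.Str.replace (PySem.Str.slice item (some 7) (some (d + 1))) " " ""

def pvAppA (k item : String) (d : Int) (g : List String × List String) : List String × List String :=
  if PySem.Str.isIn k "ip address-set china_ip_group_1" then
    (g.1 ++ [pvCmd item d], g.2)
  else
    (g.1, g.2 ++ [pvCmd item d])

def pvBodyE (k item : String) (st : Int × (List String × List String)) (p : Int × Char) :
    Int × (List String × List String) :=
  if p.2 = ' ' then
    let count := st.1 + 1
    if count = 2 then (count, pvAppA k item p.1 st.2) else (count, st.2)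
  else st

theorem foldE_spec (k item : String) : ∀ (cs : List Char) (s c : Int) (g : List String × List String),
    (PySem.List.enumerate cs s).foldl (pvBodyE k item) (c, g)
    = (c + (cs.countP (fun ch => ch == ' ') : Int),
       match (if c ≤ 1 then (((PySem.List.enumerate cs s).filter (fun p => p.2 == ' ')).map (·.1))[(1 - c).toNat]? else none) with
       | some d => pvAppA k item d g
       | none => g) := by
  intro cs
  induction cs with
  | nil => intro s c g; simp [PySem.List.enumerate_nil]
  | cons ch rest ih =>
    intro s c g
    rw [PySem.List.enumerate_cons]
    by_cases hsp : ch = ' '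
    · subst hsp
      by_cases hc : c + 1 = 2
      · have hc1 : c = 1 := by omega
        subst hc1
        simp only [List.foldl_cons, pvBodyE, if_pos hc, ih]
        simp
        omega
      · simp only [List.foldl_cons, pvBodyE, if_neg hc, ih]
        by_cases hle : c ≤ 0
        · have h1 : (1 - c).toNat = (1 - (c+1)).toNat + 1 := by omega
          simp [hle, h1]
          constructor
          · omega
          · simp [show c ≤ 1 by omega]
        · have h2 : ¬ (c + 1 ≤ 1) := by omega
          by_cases hle1 : c ≤ 1
          · -- c = 1 impossible since c+1 ≠ 2 means c ≠ 1; with ¬ c ≤ 0, c ≥ 1 so contradiction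
            omega
          · simp [h2, hle1]
            omega
    · simp only [List.foldl_cons, pvBodyE, if_neg hsp, ih]
      simp [hsp]


theorem pvGetBridge (item : String) (d : Int) (h0 : 0 ≤ d) (hlt : d < item.toList.length) :
    PySem.Str.pyGet? item d = some (PySem.List.pyGetD item.toList d ' ') := by
  have he : item.toList.length = item.length := String.length_toList
  have hl : d < (item.length : Int) := by omega
  simp [PySem.List.pyGet?, PySem.List.pyIdx?, PySem.List.pyGetD, h0, hl]


theorem innerA_spec (k item : String) (g : List String × List String) :
    pvInnerA k item g
    = match (((PySem.List.enumerate item.toList 0).filter (fun p => p.2 == ' ')).map (·.1))[1]? with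
      | some d => pvAppA k item d g
      | none => g := by
  have hrw : (PySem.List.pyRange 0 (PySem.Str.len item) 1).foldl
      (fun (st : Int × (List String × List String)) d =>
        if PySem.Str.pyGet? item d = some ' ' then
          let count := st.1 + 1
          if count = 2 then
            let id_str := PySem.Str.slice item (some 7) (some (d + 1))
            let new_id := PySem.Str.replace id_str " " ""
            if PySem.Str.isIn k "ip address-set china_ip_group_1" then
              (count, (st.2.1 ++ ["undo address " ++ new_id], st.2.2))
            else
              (count, (st.2.1, st.2.2 ++ ["undo address " ++ new_id]))
          else (count, st.2)
        else st)
      (0, g)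
      = (PySem.List.enumerate item.toList 0).foldl (pvBodyE k item) (0, g) := by
    rw [PySem.List.enumerate_eq_map_pyRange item.toList ' ', List.foldl_map]
    apply PySem.List.foldl_congr_mem
    intro st d hd
    have hmem := (PySem.List.mem_pyRange_one).mp hd
    have h0 : 0 ≤ d := hmem.1
    have hlt : d < item.toList.length := by
      have := hmem.2
      simpa [PySem.Str.len] using this
    rw [pvGetBridge item d h0 hlt]
    simp only [pvBodyE, Option.some.injEq, pvAppA, pvCmd]
    split_ifs <;> rfl
  unfold pvInnerA
  rw [hrw, foldE_spec]
  norm_num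

def pvEntryOf (is1 : Bool) (item : String) : List (String × String × Bool) :=
  match (((PySem.List.enumerate item.toList 0).filter (fun p => p.2 == ' ')).map (·.1))[1]? with
  | some i =>
    [(item, "undo address " ++ PySem.Str.replace (PySem.Str.slice item (some 7) (some (i + 1))) " " "", is1)]
  | none => []

def pvEstep (x : String) (g : List String × List String) (e : String × String × Bool) :
    List String × List String :=
  if PySem.Str.isIn x e.1 then
    if e.2.2 then (g.1 ++ [e.2.1], g.2) else (g.1, g.2 ++ [e.2.1])
  else g


theorem entriesB_eq (fw : List (String × List String)) :
    pvEntriesB fw = (PySem.Dict.ofList fw).items.flatMap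
      (fun kv => kv.2.flatMap (pvEntryOf (PySem.Str.isIn kv.1 "ip address-set china_ip_group_1"))) := by
  unfold pvEntriesB
  have hinner : ∀ (is1 : Bool) (v : List String) (es : List (String × String × Bool)),
      v.foldl
        (fun es item =>
          let sp := ((PySem.List.enumerate item.toList 0).filter (fun p => p.2 == ' ')).map (·.1)
          match sp[1]? with
          | some i =>
            let cmd := "undo address " ++
              PySem.Str.replace (PySem.Str.slice item (some 7) (some (i + 1))) " " ""
            es ++ [(item, cmd, is1)]
          | none => es) es
      = es ++ v.flatMap (pvEntryOf is1) := by
    intro is1 v es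
    have hb : (fun es item =>
          let sp := ((PySem.List.enumerate item.toList 0).filter (fun p => p.2 == ' ')).map (·.1)
          match sp[1]? with
          | some i =>
            let cmd := "undo address " ++
              PySem.Str.replace (PySem.Str.slice item (some 7) (some (i + 1))) " " ""
            es ++ [(item, cmd, is1)]
          | none => es)
        = (fun (es : List (String × String × Bool)) item => es ++ pvEntryOf is1 item) := by
      funext es item
      simp only [pvEntryOf]
      cases h : (((PySem.List.enumerate item.toList 0).filter (fun p => p.2 == ' ')).map (·.1))[1]? <;> simp
    rw [hb, PySem.List.foldl_append_eq_flatMap]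
  have ho : (fun es (kv : String × List String) =>
        let is1 := PySem.Str.isIn kv.1 "ip address-set china_ip_group_1"
        kv.2.foldl
          (fun es item =>
            let sp := ((PySem.List.enumerate item.toList 0).filter (fun p => p.2 == ' ')).map (·.1)
            match sp[1]? with
            | some i =>
              let cmd := "undo address " ++
                PySem.Str.replace (PySem.Str.slice item (some 7) (some (i + 1))) " " ""
              es ++ [(item, cmd, is1)]
            | none => es) es)
      = (fun (es : List (String × String × Bool)) kv =>
          es ++ kv.2.flatMap (pvEntryOf (PySem.Str.isIn kv.1 "ip address-set china_ip_group_1"))) := by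
    funext es kv
    exact hinner _ kv.2 es
  rw [ho, PySem.List.foldl_append_eq_flatMap]
  simp

theorem inner_fold (v : List String) (k x : String) :
    ∀ (g : List String × List String),
    v.foldl (fun g item => if PySem.Str.isIn x item then pvInnerA k item g else g) g
    = (v.flatMap (pvEntryOf (PySem.Str.isIn k "ip address-set china_ip_group_1"))).foldl (pvEstep x) g := by
  induction v with
  | nil => intro g; simp
  | cons item rest ih =>
    intro g
    simp only [List.foldl_cons, List.flatMap_cons, List.foldl_append]
    rw [← ih]
    congr 1
    rw [innerA_spec]
    cases h : (((PySem.List.enumerate item.toList 0).filter (fun p => p.2 == ' ')).map (·.1))[1]? with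
    | none => simp [pvEntryOf, h]
    | some i =>
      simp only [pvEntryOf, h, List.foldl_cons, List.foldl_nil, pvEstep, pvAppA, pvCmd]

theorem items_fold (items : List (String × List String)) (x : String) :
    ∀ (g : List String × List String),
    items.foldl (fun g kv =>
        kv.2.foldl (fun g item => if PySem.Str.isIn x item then pvInnerA kv.1 item g else g) g) g
    = (items.flatMap (fun kv =>
        kv.2.flatMap (pvEntryOf (PySem.Str.isIn kv.1 "ip address-set china_ip_group_1")))).foldl (pvEstep x) g := by
  induction items with
  | nil => intro g; simp
  | cons kv rest ih =>
    intro g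
    simp only [List.foldl_cons, List.flatMap_cons, List.foldl_append]
    rw [← ih, inner_fold]


theorem pv_final (dl : List String) (fw : List (String × List String)) :
    get_delete_id dl fw = get_delete_id_alt dl fw := by
  unfold get_delete_id get_delete_id_alt
  rw [entriesB_eq]
  have hstep : (fun (g : List String × List String) (x : String) =>
      (PySem.Dict.ofList fw).items.foldl
        (fun g kv =>
          kv.2.foldl
            (fun g item => if PySem.Str.isIn x item then pvInnerA kv.1 item g else g) g)
        g)
    = (fun g x => ((PySem.Dict.ofList fw).items.flatMap (fun kv =>
        kv.2.flatMap (pvEntryOf (PySem.Str.isIn kv.1 "ip address-set china_ip_group_1")))).foldl (pvEstep x) g) := by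
    funext g x
    exact items_fold _ x g
  rw [hstep]
  rfl

-- ===== VERDICT (by name: the statement is the Claim_ definition above) =====
theorem get_delete_id_spec : Claim_equal_get_delete_id := by
  intro dl fw _
  unfold Spec_get_delete_id
  exact pv_final dl fw
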